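-- pv_equiv track=rewrite | github.com/youth4ever/orion | Project EULER/pb136 Singleton difference.py | singleton_set
-- ===== SOURCE A (Python) =====
-- from math import gcd, sqrt
--
-- def singleton_set(n):           # CALIBRATED
--     B=[]
--     for x in range(3*n//2, 1, -1) :
--         for p in range(1, 2*n//3+1) :
--             y , z = x-p, x-2*p
--             if y>0 and z > 0 :
--                 if  ( x**2 - y**2 - z**2 == n )  :
--                     B.append((n, x, y, z , p, x+y+z, gcd(n, x+y+z) ))
--                     if len(B) ==2 : break
--     return B
-- ===== SOURCE B (Python) =====
-- from math import gcd, isqrt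
--
-- def singleton_set(n):
--     B = []
--     hi = 2 * n // 3
--     for x in range(3 * n // 2, 1, -1):
--         disc = 4 * x * x - 5 * n
--         if disc < 0:
--             continue
--         s = isqrt(disc)
--         if s * s != disc:
--             continue
--         for num in ((3 * x,) if s == 0 else (3 * x - s, 3 * x + s)):
--             if num % 5:
--                 continue
--             p = num // 5
--             if 1 <= p <= hi and x - 2 * p > 0:
--                 y, z = x - p, x - 2 * p
--                 B.append((n, x, y, z, p, x + y + z, gcd(n, x + y + z)))
--                 if len(B) == 2:
--                     break
--     return B
-- ===== Notes on version B (the rewrite author's own statement) =====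
-- stated objective: faster
-- what changed: B removes A's inner loop over all p in range(1, 2n//3+1): for each x it solves the quadratic 5p^2-6xp+x^2+n=0 directly, testing whether the discriminant 4x^2-5n is a perfect square and checking the at most two integer roots p=(3x±s)/5, keeping A's append order and its 'len(B)==2' break.
import Mathlib
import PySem

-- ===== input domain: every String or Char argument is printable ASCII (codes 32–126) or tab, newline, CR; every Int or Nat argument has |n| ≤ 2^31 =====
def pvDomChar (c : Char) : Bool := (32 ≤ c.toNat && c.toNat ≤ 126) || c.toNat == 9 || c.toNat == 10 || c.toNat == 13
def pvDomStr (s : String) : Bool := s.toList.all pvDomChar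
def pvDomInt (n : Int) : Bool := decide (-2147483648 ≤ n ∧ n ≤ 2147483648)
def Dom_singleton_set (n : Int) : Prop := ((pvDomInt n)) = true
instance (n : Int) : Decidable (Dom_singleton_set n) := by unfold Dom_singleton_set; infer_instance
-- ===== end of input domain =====

-- B replaces A's inner scan over all p by solving the quadratic x^2-y^2-z^2=n for p via a
-- perfect-square discriminant test per x (measured faster); same results, same order.


-- ===== PORT A =====
-- inner 'for p in range(1, 2*n//3+1)' loop, with the 'if len(B)==2: break'
def pvInnerA (n x : Int) : List Int → List (List Int) → List (List Int)
  | [], B => B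
  | p :: ps, B =>
    let y := x - p
    let z := x - 2 * p
    if y > 0 ∧ z > 0 then
      if x ^ 2 - y ^ 2 - z ^ 2 = n then
        let B' := B ++ [[n, x, y, z, p, x + y + z, (Int.gcd n (x + y + z) : Int)]]
        if B'.length = 2 then B' else pvInnerA n x ps B'
      else pvInnerA n x ps B
    else pvInnerA n x ps B

def singleton_set (n : Int) : List (List Int) :=
  (PySem.List.pyRange (PySem.Int.floordiv (3 * n) 2) 1 (-1)).foldl
    (fun B x => pvInnerA n x (PySem.List.pyRange 1 (PySem.Int.floordiv (2 * n) 3 + 1) 1) B) []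

-- ===== PORT B =====
-- loop over the (at most two) candidate numerators 3*x-s, 3*x+s; same append/break as A
def pvInnerB (n x hi : Int) : List Int → List (List Int) → List (List Int)
  | [], B => B
  | num :: rest, B =>
    if PySem.Int.mod num 5 ≠ 0 then pvInnerB n x hi rest B
    else
      let p := PySem.Int.floordiv num 5
      if 1 ≤ p ∧ p ≤ hi ∧ x - 2 * p > 0 then
        let y := x - p
        let z := x - 2 * p
        let B' := B ++ [[n, x, y, z, p, x + y + z, (Int.gcd n (x + y + z) : Int)]]
        if B'.length = 2 then B' else pvInnerB n x hi rest B'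
      else pvInnerB n x hi rest B

def singleton_set_alt (n : Int) : List (List Int) :=
  let hi := PySem.Int.floordiv (2 * n) 3
  (PySem.List.pyRange (PySem.Int.floordiv (3 * n) 2) 1 (-1)).foldl
    (fun B x =>
      let disc := 4 * x * x - 5 * n
      if disc < 0 then B
      else
        let s := Int.sqrt disc      -- math.isqrt on the non-negative disc
        if s * s ≠ disc then B
        else pvInnerB n x hi (if s = 0 then [3 * x] else [3 * x - s, 3 * x + s]) B) []

-- ===== PRECONDITION & SPEC =====
def Spec_singleton_set (n : Int) (out : List (List Int)) : Prop := out = singleton_set_alt n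
instance (n : Int) (out : List (List Int)) : Decidable (Spec_singleton_set n out) := by unfold Spec_singleton_set; infer_instance

-- ===== CLAIM (what is proved, stated in full; the proofs are below) =====
def Claim_equal_singleton_set : Prop := ∀ (n : Int), Dom_singleton_set n → Spec_singleton_set n (singleton_set n)

-- ===== LEMMAS AND PROOFS =====

-- the appended 7-tuple, as a function of p
def pvTup (n x p : Int) : List Int :=
  [n, x, x - p, x - 2 * p, p, x + (x - p) + (x - 2 * p), (Int.gcd n (x + (x - p) + (x - 2 * p)) : Int)]

-- append the prepared tuples one by one, with A's/B's 'if len==2: break'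
def pvProc : List (List Int) → List (List Int) → List (List Int)
  | B, [] => B
  | B, t :: ts => let B' := B ++ [t]; if B'.length = 2 then B' else pvProc B' ts

def pvCondA (n x p : Int) : Bool :=
  decide ((x - p > 0 ∧ x - 2 * p > 0) ∧ x ^ 2 - (x - p) ^ 2 - (x - 2 * p) ^ 2 = n)

def pvCondB (x hi num : Int) : Bool :=
  decide (PySem.Int.mod num 5 = 0 ∧ 1 ≤ PySem.Int.floordiv num 5 ∧
          PySem.Int.floordiv num 5 ≤ hi ∧ x - 2 * PySem.Int.floordiv num 5 > 0)

theorem pvInnerA_eq_proc (n x : Int) (L : List Int) :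
    ∀ B, pvInnerA n x L B = pvProc B ((L.filter (pvCondA n x)).map (pvTup n x)) := by
  induction L with
  | nil => intro B; rfl
  | cons p ps ih =>
    intro B
    simp only [pvInnerA, List.filter_cons]
    by_cases h1 : (x - p > 0 ∧ x - 2 * p > 0)
    · by_cases h2 : x ^ 2 - (x - p) ^ 2 - (x - 2 * p) ^ 2 = n
      · rw [if_pos h1, if_pos h2,
          if_pos (show pvCondA n x p = true by simp only [pvCondA, decide_eq_true_eq]; tauto)]
        simp only [List.map_cons, pvProc, pvTup]
        split
        · rfl
        · exact ih _
      · rw [if_pos h1, if_neg h2,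
          if_neg (show ¬ pvCondA n x p = true by simp only [pvCondA, decide_eq_true_eq]; tauto)]
        exact ih _
    · rw [if_neg h1,
        if_neg (show ¬ pvCondA n x p = true by simp only [pvCondA, decide_eq_true_eq]; tauto)]
      exact ih _

theorem pvInnerB_eq_proc (n x hi : Int) (L : List Int) :
    ∀ B, pvInnerB n x hi L B =
      pvProc B ((L.filter (pvCondB x hi)).map (fun num => pvTup n x (PySem.Int.floordiv num 5))) := by
  induction L with
  | nil => intro B; rfl
  | cons num rest ih =>
    intro B
    simp only [pvInnerB, List.filter_cons]
    by_cases h1 : PySem.Int.mod num 5 = 0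
    · rw [if_neg (not_not_intro h1)]
      by_cases h2 : (1 ≤ PySem.Int.floordiv num 5 ∧ PySem.Int.floordiv num 5 ≤ hi ∧
          x - 2 * PySem.Int.floordiv num 5 > 0)
      · rw [if_pos h2,
          if_pos (show pvCondB x hi num = true by simp only [pvCondB, decide_eq_true_eq]; tauto)]
        simp only [List.map_cons, pvProc, pvTup]
        split
        · rfl
        · exact ih _
      · rw [if_neg h2,
          if_neg (show ¬ pvCondB x hi num = true by simp only [pvCondB, decide_eq_true_eq]; tauto)]
        exact ih _
    · rw [if_pos (show PySem.Int.mod num 5 ≠ 0 from h1),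
        if_neg (show ¬ pvCondB x hi num = true by simp only [pvCondB, decide_eq_true_eq]; tauto)]
      exact ih _

-- the quadratic identity: A's equation in p is exactly '(5p-3x)^2 = 4x^2-5n'
theorem pvKey (n x p : Int) :
    (x ^ 2 - (x - p) ^ 2 - (x - 2 * p) ^ 2 = n) ↔
      (5 * p - 3 * x) * (5 * p - 3 * x) = 4 * x * x - 5 * n := by
  constructor
  · intro h; linear_combination (-5 : Int) * h
  · intro h
    have h5 : (5 : Int) * (x ^ 2 - (x - p) ^ 2 - (x - 2 * p) ^ 2) = 5 * n := by
      linear_combination -h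
    exact mul_left_cancel₀ (by norm_num) h5

theorem pvFdiv5 (p : Int) : PySem.Int.floordiv (5 * p) 5 = p := by
  rw [PySem.Int.floordiv_eq_ediv_of_pos (by norm_num)]
  exact Int.mul_ediv_cancel_left p (by norm_num)

-- two strictly increasing lists with the filter's membership are the filter
theorem pvFilter_eq_of_sorted (L T : List Int) (P : Int → Bool)
    (hL : L.Pairwise (· < ·)) (hT : T.Pairwise (· < ·))
    (hmem : ∀ p : Int, p ∈ T ↔ p ∈ L ∧ P p = true) : L.filter P = T := by
  have h1 : (L.filter P).Pairwise (· < ·) := hL.filter P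
  have hperm : (L.filter P).Perm T := by
    rw [List.perm_ext_iff_of_nodup h1.nodup hT.nodup]
    intro a
    rw [List.mem_filter, hmem]
  exact List.Perm.eq_of_pairwise
    (fun a b _ _ hab hba => absurd hba (lt_asymm hab)) h1 hT hperm

theorem pvStep_eq (n x : Int) (B : List (List Int)) :
    pvInnerA n x (PySem.List.pyRange 1 (PySem.Int.floordiv (2 * n) 3 + 1) 1) B =
      (let hi := PySem.Int.floordiv (2 * n) 3
       let disc := 4 * x * x - 5 * n
       if disc < 0 then B
       else
         let s := Int.sqrt disc
         if s * s ≠ disc then B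
         else pvInnerB n x hi (if s = 0 then [3 * x] else [3 * x - s, 3 * x + s]) B) := by
  set hi := PySem.Int.floordiv (2 * n) 3 with hhi
  set d := 4 * x * x - 5 * n with hd
  rw [pvInnerA_eq_proc]
  by_cases hneg : d < 0
  · rw [if_pos hneg]
    have : (PySem.List.pyRange 1 (hi + 1) 1).filter (pvCondA n x) = [] := by
      rw [List.filter_eq_nil_iff]
      intro p _ hp
      simp only [pvCondA, decide_eq_true_eq] at hp
      have := (pvKey n x p).mp hp.2
      nlinarith [mul_self_nonneg (5 * p - 3 * x)]
    rw [this]; rfl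
  · rw [if_neg hneg]
    set s := Int.sqrt d with hs
    have hs0 : 0 ≤ s := Int.sqrt_nonneg d
    by_cases hsq : s * s = d
    swap
    · rw [if_pos (show s * s ≠ d from hsq)]
      have : (PySem.List.pyRange 1 (hi + 1) 1).filter (pvCondA n x) = [] := by
        rw [List.filter_eq_nil_iff]
        intro p _ hp
        simp only [pvCondA, decide_eq_true_eq] at hp
        have ht := (pvKey n x p).mp hp.2
        have habs : Int.sqrt d = ((5 * p - 3 * x).natAbs : Int) := by
          rw [hd, ← ht, Int.sqrt_eq]
        apply hsq
        rw [hs, habs, Int.natAbs_mul_self', ht, hd]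
      rw [this]; rfl
    · rw [if_neg (not_not_intro hsq)]
      rw [pvInnerB_eq_proc]
      by_cases hz : s = 0
      · rw [if_pos hz]
        have hd0 : d = 0 := by rw [← hsq, hz]; ring
        have hfil : (PySem.List.pyRange 1 (hi + 1) 1).filter (pvCondA n x) =
            ([3 * x].filter (pvCondB x hi)).map (fun num => PySem.Int.floordiv num 5) := by
          apply pvFilter_eq_of_sorted _ _ _ (PySem.List.pairwise_lt_pyRange_one 1 (hi + 1))
          · rw [List.filter_singleton]
            cases pvCondB x hi (3 * x) <;> simp
          · intro p
            rw [List.mem_map]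
            constructor
            · rintro ⟨num, hnf, rfl⟩
              rw [List.mem_filter] at hnf
              obtain ⟨hnum_mem, hcB⟩ := hnf
              simp only [pvCondB, decide_eq_true_eq] at hcB
              obtain ⟨hmod, h1p, h2p, hzp⟩ := hcB
              obtain ⟨k, hk⟩ := (PySem.Int.mod_eq_zero_iff_dvd num 5).mp hmod
              have hnum : num = 3 * x := by simpa using hnum_mem
              have hfk : PySem.Int.floordiv num 5 = k := by rw [hk]; exact pvFdiv5 k
              rw [hfk] at h1p h2p hzp ⊢
              refine ⟨PySem.List.mem_pyRange_one.mpr ⟨h1p, by omega⟩, ?_⟩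
              simp only [pvCondA, decide_eq_true_eq]
              refine ⟨⟨by omega, hzp⟩, ?_⟩
              rw [pvKey]
              have h53 : 5 * k - 3 * x = 0 := by omega
              rw [h53, ← hd, hd0]; norm_num
            · rintro ⟨hpL, hcA⟩
              have hpL' := PySem.List.mem_pyRange_one.mp hpL
              simp only [pvCondA, decide_eq_true_eq] at hcA
              obtain ⟨⟨hy, hzz⟩, heq⟩ := hcA
              have ht := (pvKey n x p).mp heq
              rw [← hd] at ht
              have h53 : 5 * p - 3 * x = 0 := mul_self_eq_zero.mp (by rw [ht, hd0])
              have h3x : 3 * x = 5 * p := by omega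
              refine ⟨3 * x, ?_, by rw [h3x, pvFdiv5]⟩
              rw [List.mem_filter]
              refine ⟨by simp, ?_⟩
              simp only [pvCondB, decide_eq_true_eq]
              rw [h3x, pvFdiv5]
              exact ⟨(PySem.Int.mod_eq_zero_iff_dvd _ 5).mpr ⟨p, rfl⟩, by omega, by omega, by omega⟩
        rw [hfil, List.map_map]
        rfl
      · rw [if_neg hz]
        have hspos : 0 < s := lt_of_le_of_ne hs0 (Ne.symm hz)
        have hfil : (PySem.List.pyRange 1 (hi + 1) 1).filter (pvCondA n x) =
            ([3 * x - s, 3 * x + s].filter (pvCondB x hi)).map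
              (fun num => PySem.Int.floordiv num 5) := by
          apply pvFilter_eq_of_sorted _ _ _ (PySem.List.pairwise_lt_pyRange_one 1 (hi + 1))
          · apply List.pairwise_map.mpr
            have hnum_pw : ([3 * x - s, 3 * x + s] : List Int).Pairwise (· < ·) := by
              simp; omega
            refine List.Pairwise.imp_of_mem ?_ (hnum_pw.filter (pvCondB x hi))
            intro a b ha hb hab
            rw [List.mem_filter] at ha hb
            have hca := ha.2; have hcb := hb.2
            simp only [pvCondB, decide_eq_true_eq] at hca hcb
            obtain ⟨k, hk⟩ := (PySem.Int.mod_eq_zero_iff_dvd a 5).mp hca.1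
            obtain ⟨l, hl⟩ := (PySem.Int.mod_eq_zero_iff_dvd b 5).mp hcb.1
            rw [hk, pvFdiv5, hl, pvFdiv5]
            omega
          · intro p
            rw [List.mem_map]
            constructor
            · rintro ⟨num, hnf, rfl⟩
              rw [List.mem_filter] at hnf
              obtain ⟨hnum_mem, hcB⟩ := hnf
              simp only [pvCondB, decide_eq_true_eq] at hcB
              obtain ⟨hmod, h1p, h2p, hzp⟩ := hcB
              obtain ⟨k, hk⟩ := (PySem.Int.mod_eq_zero_iff_dvd num 5).mp hmod
              have hnum : num = 3 * x - s ∨ num = 3 * x + s := by simpa using hnum_mem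
              have hfk : PySem.Int.floordiv num 5 = k := by rw [hk]; exact pvFdiv5 k
              rw [hfk] at h1p h2p hzp ⊢
              refine ⟨PySem.List.mem_pyRange_one.mpr ⟨h1p, by omega⟩, ?_⟩
              simp only [pvCondA, decide_eq_true_eq]
              refine ⟨⟨by omega, hzp⟩, ?_⟩
              rw [pvKey, ← hd, ← hsq]
              rcases hnum with h | h
              · rw [show 5 * k - 3 * x = -s by omega]; ring
              · rw [show 5 * k - 3 * x = s by omega]
            · rintro ⟨hpL, hcA⟩
              have hpL' := PySem.List.mem_pyRange_one.mp hpL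
              simp only [pvCondA, decide_eq_true_eq] at hcA
              obtain ⟨⟨hy, hzz⟩, heq⟩ := hcA
              have ht := (pvKey n x p).mp heq
              rw [← hd, ← hsq] at ht
              rcases mul_self_eq_mul_self_iff.mp ht with h | h
              · refine ⟨3 * x + s, ?_, by rw [show 3 * x + s = 5 * p by omega, pvFdiv5]⟩
                rw [List.mem_filter]
                refine ⟨by simp, ?_⟩
                simp only [pvCondB, decide_eq_true_eq]
                rw [show 3 * x + s = 5 * p by omega, pvFdiv5]
                exact ⟨(PySem.Int.mod_eq_zero_iff_dvd _ 5).mpr ⟨p, rfl⟩, by omega, by omega, by omega⟩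
              · refine ⟨3 * x - s, ?_, by rw [show 3 * x - s = 5 * p by omega, pvFdiv5]⟩
                rw [List.mem_filter]
                refine ⟨by simp, ?_⟩
                simp only [pvCondB, decide_eq_true_eq]
                rw [show 3 * x - s = 5 * p by omega, pvFdiv5]
                exact ⟨(PySem.Int.mod_eq_zero_iff_dvd _ 5).mpr ⟨p, rfl⟩, by omega, by omega, by omega⟩
        rw [hfil, List.map_map]
        rfl

-- ===== VERDICT (by name: the statement is the Claim_ definition above) =====
theorem singleton_set_spec : Claim_equal_singleton_set := by
  unfold Claim_equal_singleton_set Spec_singleton_set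
  intro n _
  show singleton_set n = singleton_set_alt n
  unfold singleton_set singleton_set_alt
  apply List.foldl_ext
  intro B x _
  exact pvStep_eq n x B
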